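-- pv_equiv track=rewrite | github.com/ravynsoft/ravynos | Frameworks/OpenGL/mesa/src/asahi/lib/gen_pack.py | to_alphanum
-- ===== SOURCE A (Python) =====
-- def to_alphanum(name):
--     substitutions = {
--         ' ': '_',
--         '/': '_',
--         '[': '',
--         ']': '',
--         '(': '',
--         ')': '',
--         '-': '_',
--         ':': '',
--         '.': '',
--         ',': '',
--         '=': '',
--         '>': '',
--         '#': '',
--         '&': '',
--         '*': '',
--         '"': '',
--         '+': '',
--         '\'': '',
--         '?': '',
--     }
--
--     for i, j in substitutions.items():
--         name = name.replace(i, j)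
--
--     return name
-- ===== SOURCE B (Python) =====
-- def to_alphanum(name):
--     def sub(c):
--         if c in (' ', '/', '-'):
--             return '_'
--         if c in ('[', ']', '(', ')', ':', '.', ',', '=', '>', '#', '&', '*', '"', '+', "'", '?'):
--             return ''
--         return c
--     return ''.join(sub(c) for c in name)
-- ===== Notes on version B (the rewrite author's own statement) =====
-- stated objective: simpler
-- what changed: Replaces 19 sequential whole-string str.replace passes by a single character-wise pass mapping each character through one substitution function and joining the results (safe: no substitution output is itself a key).
import Mathlib
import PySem

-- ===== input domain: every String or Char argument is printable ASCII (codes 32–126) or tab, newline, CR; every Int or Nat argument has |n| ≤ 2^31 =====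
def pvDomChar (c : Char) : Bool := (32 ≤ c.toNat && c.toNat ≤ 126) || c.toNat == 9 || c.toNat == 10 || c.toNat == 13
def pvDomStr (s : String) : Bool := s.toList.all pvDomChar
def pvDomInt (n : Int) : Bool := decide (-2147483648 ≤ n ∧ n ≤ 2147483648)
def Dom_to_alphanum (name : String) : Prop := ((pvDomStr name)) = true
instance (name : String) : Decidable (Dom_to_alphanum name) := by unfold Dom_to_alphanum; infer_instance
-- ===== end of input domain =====

-- B replaces A's 19 sequential whole-string replace passes by one character-wise
-- substitution pass (simpler, single traversal; no substitution output is itself a key).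

-- ===== PORT A =====
-- the substitutions dict, in insertion order, iterated by .items()
def pvSubsA : List (String × String) :=
  [(" ", "_"), ("/", "_"), ("[", ""), ("]", ""), ("(", ""), (")", ""),
   ("-", "_"), (":", ""), (".", ""), (",", ""), ("=", ""), (">", ""),
   ("#", ""), ("&", ""), ("*", ""), ("\"", ""), ("+", ""), ("'", ""), ("?", "")]

def to_alphanum (name : String) : String :=
  pvSubsA.foldl (fun s p => PySem.Str.replace s p.1 p.2) name

-- ===== PORT B =====
-- Source B's sub(c): '_' for ' ','/','-'; '' for the dropped punctuation; else c itself
def pvSubChar (c : Char) : String :=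
  if c ∈ [' ', '/', '-'] then "_"
  else if c ∈ ['[', ']', '(', ')', ':', '.', ',', '=', '>', '#', '&', '*', '"', '+', '\'', '?'] then ""
  else String.ofList [c]

def to_alphanum_alt (name : String) : String :=
  PySem.Str.join "" (name.toList.map pvSubChar)

-- ===== PRECONDITION & SPEC =====
def Spec_to_alphanum (name : String) (out : String) : Prop := out = to_alphanum_alt name
instance (name : String) (out : String) : Decidable (Spec_to_alphanum name out) := by unfold Spec_to_alphanum; infer_instance

-- ===== CLAIM (what is proved, stated in full; the proofs are below) =====
def Claim_equal_to_alphanum : Prop := ∀ (name : String), Dom_to_alphanum name → Spec_to_alphanum name (to_alphanum name)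

-- ===== LEMMAS AND PROOFS =====

-- Chars.replace with a single-character pattern is a character-wise flatMap
lemma pv_go_single (o : Char) (r : List Char) :
    ∀ (l : List Char) (fuel : Nat) (acc : List Char), l.length ≤ fuel →
      PySem.Chars.replace.go [o] r fuel l acc
        = acc.reverse ++ l.flatMap (fun x => if x = o then r else [x]) := by
  intro l
  induction l with
  | nil =>
    intro fuel acc _
    cases fuel <;> simp [PySem.Chars.replace.go]
  | cons c t ih =>
    intro fuel acc h
    cases fuel with
    | zero => simp at h
    | succ n =>
      simp only [PySem.Chars.replace.go]
      by_cases hc : c = o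
      · subst hc
        simp [List.isPrefixOf, ih n _ (by simpa using h)]
      · have hp : [o].isPrefixOf (c :: t) = false := by
          simp [List.isPrefixOf, Ne.symm hc]
        simp [hp, hc, ih n _ (by simpa using h)]

lemma pv_replace_single (o : Char) (r : List Char) (l : List Char) :
    PySem.Chars.replace l [o] r = l.flatMap (fun x => if x = o then r else [x]) := by
  simp [PySem.Chars.replace, pv_go_single o r l l.length [] (le_refl _)]

-- joining with the empty separator is flatten
lemma pv_join_nil_flatten : ∀ (ls : List (List Char)), PySem.Chars.join [] ls = ls.flatten
  | [] => PySem.Chars.join_nil []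
  | [a] => by simp [PySem.Chars.join_singleton]
  | a :: b :: t => by
      rw [PySem.Chars.join_cons_cons]
      simp [pv_join_nil_flatten (b :: t)]

-- A's fold of string replaces, moved to the character-list side
lemma pv_fold_bridge (ps : List (String × String)) :
    ∀ (s : String), (ps.foldl (fun s p => PySem.Str.replace s p.1 p.2) s).toList
      = ps.foldl (fun l p => PySem.Chars.replace l p.1.toList p.2.toList) s.toList := by
  induction ps with
  | nil => intro s; rfl
  | cons p t ih => intro s; simp only [List.foldl_cons, ih, PySem.Str.toList_replace]

lemma pv_foldA_toList (name : String) :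
    (to_alphanum name).toList
      = pvSubsA.foldl (fun l p => PySem.Chars.replace l p.1.toList p.2.toList) name.toList :=
  pv_fold_bridge pvSubsA name

-- every key of A's dict is a single character
lemma pv_singles : ∀ p ∈ pvSubsA, ∃ o : Char, p.1.toList = [o] := by
  intro p hp
  fin_cases hp <;> exact ⟨_, rfl⟩

-- each replace stage is a flatMap, so the whole fold distributes over ++
lemma pv_fold_append (ps : List (String × String))
    (hps : ∀ p ∈ ps, ∃ o : Char, p.1.toList = [o]) (l1 l2 : List Char) :
    ps.foldl (fun l p => PySem.Chars.replace l p.1.toList p.2.toList) (l1 ++ l2)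
      = ps.foldl (fun l p => PySem.Chars.replace l p.1.toList p.2.toList) l1
        ++ ps.foldl (fun l p => PySem.Chars.replace l p.1.toList p.2.toList) l2 := by
  induction ps generalizing l1 l2 with
  | nil => rfl
  | cons p t ih =>
    obtain ⟨o, ho⟩ := hps p (List.mem_cons_self)
    simp only [List.foldl_cons, ho, pv_replace_single, List.flatMap_append]
    exact ih (fun q hq => hps q (List.mem_cons_of_mem p hq)) _ _

-- a character that is no key passes through the whole fold unchanged
lemma pv_fixed (ps : List (String × String)) (c : Char)
    (h : ∀ p ∈ ps, ∃ o : Char, p.1.toList = [o] ∧ c ≠ o) :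
    ps.foldl (fun l p => PySem.Chars.replace l p.1.toList p.2.toList) [c] = [c] := by
  induction ps with
  | nil => rfl
  | cons p t ih =>
    obtain ⟨o, ho, hne⟩ := h p (List.mem_cons_self)
    simp only [List.foldl_cons, ho, pv_replace_single, List.flatMap_cons, List.flatMap_nil,
      List.append_nil, if_neg hne]
    exact ih (fun q hq => h q (List.mem_cons_of_mem p hq))

-- on a single character A's fold computes exactly B's substitution function
lemma pv_single_char (c : Char) :
    pvSubsA.foldl (fun l p => PySem.Chars.replace l p.1.toList p.2.toList) [c]
      = (pvSubChar c).toList := by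
  by_cases h0 : c = ' '
  · subst h0; decide
  by_cases h1 : c = '/'
  · subst h1; decide
  by_cases h2 : c = '['
  · subst h2; decide
  by_cases h3 : c = ']'
  · subst h3; decide
  by_cases h4 : c = '('
  · subst h4; decide
  by_cases h5 : c = ')'
  · subst h5; decide
  by_cases h6 : c = '-'
  · subst h6; decide
  by_cases h7 : c = ':'
  · subst h7; decide
  by_cases h8 : c = '.'
  · subst h8; decide
  by_cases h9 : c = ','
  · subst h9; decide
  by_cases h10 : c = '='
  · subst h10; decide
  by_cases h11 : c = '>'
  · subst h11; decide
  by_cases h12 : c = '#'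
  · subst h12; decide
  by_cases h13 : c = '&'
  · subst h13; decide
  by_cases h14 : c = '*'
  · subst h14; decide
  by_cases h15 : c = '\"'
  · subst h15; decide
  by_cases h16 : c = '+'
  · subst h16; decide
  by_cases h17 : c = '\''
  · subst h17; decide
  by_cases h18 : c = '?'
  · subst h18; decide
  have hfix := pv_fixed pvSubsA c (by
    intro p hp
    fin_cases hp
    exacts [⟨' ', rfl, h0⟩, ⟨'/', rfl, h1⟩, ⟨'[', rfl, h2⟩, ⟨']', rfl, h3⟩, ⟨'(', rfl, h4⟩, ⟨')', rfl, h5⟩, ⟨'-', rfl, h6⟩, ⟨':', rfl, h7⟩, ⟨'.', rfl, h8⟩, ⟨',', rfl, h9⟩, ⟨'=', rfl, h10⟩, ⟨'>', rfl, h11⟩, ⟨'#', rfl, h12⟩, ⟨'&', rfl, h13⟩, ⟨'*', rfl, h14⟩, ⟨'\"', rfl, h15⟩, ⟨'+', rfl, h16⟩, ⟨'\'', rfl, h17⟩, ⟨'?', rfl, h18⟩])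
  rw [hfix]
  simp [pvSubChar, h0, h1, h2, h3, h4, h5, h6, h7, h8, h9, h10, h11, h12, h13, h14, h15, h16, h17, h18]

-- the chars-side computation of A equals B's character-wise pass
lemma pv_main (cs : List Char) :
    pvSubsA.foldl (fun l p => PySem.Chars.replace l p.1.toList p.2.toList) cs
      = cs.flatMap (fun c => (pvSubChar c).toList) := by
  induction cs with
  | nil => decide
  | cons c t ih =>
    have hsplit : c :: t = [c] ++ t := rfl
    rw [hsplit, pv_fold_append pvSubsA pv_singles [c] t, pv_single_char, ih]
    simp

-- ===== VERDICT (by name: the statement is the Claim_ definition above) =====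
theorem to_alphanum_spec : Claim_equal_to_alphanum := by
  intro name _
  unfold Spec_to_alphanum to_alphanum_alt
  rw [← String.toList_inj, pv_foldA_toList, pv_main, PySem.Str.toList_join]
  show _ = PySem.Chars.join [] _
  rw [pv_join_nil_flatten]
  simp [List.flatMap, Function.comp_def]
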